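-- pv_equiv track=rewrite | github.com/ShuoInBMG/FN-DLS | sfn/graph-analysis/traj/strand_detect.py | group_connected_paths
-- ===== SOURCE A (Python) =====
-- def group_connected_paths(connected_paths):
--     grouped_paths = []
--     current_group = [connected_paths[0]]
--
--     for i in range(1, len(connected_paths)):
--         if connected_paths[i][0] == current_group[0][0] and connected_paths[i][-1] == current_group[0][-1] and len(connected_paths[i]) == len(current_group[0]):
--             current_group.append(connected_paths[i])
--         else:
--             if len(current_group) > 1:
--                 grouped_paths.append(current_group)
--             current_group = [connected_paths[i]]
--
--     if len(current_group) > 1: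
--         grouped_paths.append(current_group)
--
--     return grouped_paths
-- ===== SOURCE B (Python) =====
-- def group_connected_paths(connected_paths):
--     # staged passes: label every path with a run id, bucket paths by run id
--     # in a dict, keep the buckets with more than one path
--     keys = [(p[:1], p[-1:], len(p)) for p in connected_paths]
--     gids = []
--     g = 0
--     prev = None
--     for k in keys:
--         if prev is not None and k != prev:
--             g += 1
--         gids.append(g)
--         prev = k
--     buckets = {}
--     for g, p in zip(gids, connected_paths):
--         buckets.setdefault(g, []).append(p)
--     return [grp for grp in buckets.values() if len(grp) > 1]
-- ===== Notes on version B (the rewrite author's own statement) =====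
-- stated objective: alternative
-- what changed: Replaces A's single fold with a mutable current-group accumulator by three staged passes: compute a (first,last,length) key per path, label each path with a run id by counting key changes, bucket paths by run id in an insertion-ordered dict, and keep the buckets of size > 1.
import Mathlib
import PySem

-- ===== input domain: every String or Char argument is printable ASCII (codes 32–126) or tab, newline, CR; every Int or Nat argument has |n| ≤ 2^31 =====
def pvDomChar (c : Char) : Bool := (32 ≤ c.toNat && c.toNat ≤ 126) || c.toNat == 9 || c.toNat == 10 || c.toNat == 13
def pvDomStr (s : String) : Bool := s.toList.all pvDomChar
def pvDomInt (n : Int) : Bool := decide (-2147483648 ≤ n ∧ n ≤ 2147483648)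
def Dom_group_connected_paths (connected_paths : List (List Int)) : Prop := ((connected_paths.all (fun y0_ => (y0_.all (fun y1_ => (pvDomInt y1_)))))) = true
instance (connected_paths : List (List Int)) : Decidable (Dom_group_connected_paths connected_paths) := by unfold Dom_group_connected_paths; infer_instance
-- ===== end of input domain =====

-- B replaces A's single accumulate-current-group fold by staged passes: a key per path,
-- a run-id labeling pass, dict bucketing by run id, then a size filter (alternative, same cost).


-- ===== PORT A =====
-- one iteration of A's loop, applied to the element connected_paths[i];
-- state = (grouped_paths, current_group)
def pvStepA (st : List (List (List Int)) × List (List Int)) (p : List Int) :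
    List (List (List Int)) × List (List Int) :=
  let h := PySem.List.pyGetD st.2 0 []
  if PySem.List.pyGet? p 0 = PySem.List.pyGet? h 0 ∧
     PySem.List.pyGet? p (-1) = PySem.List.pyGet? h (-1) ∧
     p.length = h.length
  then (st.1, st.2 ++ [p])
  else (if 1 < st.2.length then st.1 ++ [st.2] else st.1, [p])

def group_connected_paths (connected_paths : List (List Int)) : List (List (List Int)) :=
  match PySem.List.pyGet? connected_paths 0 with
  | none => []  -- IndexError on empty input; excluded by Pre_
  | some p0 =>
    let st := (PySem.List.pyRange 1 (connected_paths.length : Int) 1).foldl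
      (fun st i => pvStepA st (PySem.List.pyGetD connected_paths i [])) ([], [p0])
    if 1 < st.2.length then st.1 ++ [st.2] else st.1

-- ===== PORT B =====
-- key(p) = (p[:1], p[-1:], len(p))
def pvKey (p : List Int) : List Int × List Int × Int :=
  (PySem.List.slice p none (some 1), PySem.List.slice p (some (-1)) none, (p.length : Int))

-- one iteration of B's labeling pass: state = (g, prev, gids)
def pvGidStep (st : Int × Option (List Int × List Int × Int) × List Int)
    (k : List Int × List Int × Int) :
    Int × Option (List Int × List Int × Int) × List Int :=
  let g := match st.2.1 with
    | some pk => if k ≠ pk then st.1 + 1 else st.1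
    | none => st.1
  (g, some k, st.2.2 ++ [g])

def group_connected_paths_alt (connected_paths : List (List Int)) : List (List (List Int)) :=
  let keys := connected_paths.map pvKey
  let gids := (keys.foldl pvGidStep (0, none, [])).2.2
  let buckets := (gids.zip connected_paths).foldl
    (fun d q => d.modify q.1 [] (· ++ [q.2])) PySem.Dict.empty
  buckets.values.filter (fun grp => decide (1 < grp.length))

-- ===== PRECONDITION & SPEC =====
-- Pre_ excludes exactly the inputs on which A raises IndexError: the empty list
-- (connected_paths[0]) and any list of length ≥ 2 containing an empty path (p[0]/p[-1]).
def Pre_group_connected_paths (connected_paths : List (List Int)) : Prop :=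
  connected_paths ≠ [] ∧ (1 < connected_paths.length → ∀ p ∈ connected_paths, p ≠ [])
instance (connected_paths : List (List Int)) : Decidable (Pre_group_connected_paths connected_paths) := by unfold Pre_group_connected_paths; infer_instance
def pvWitness_group_connected_paths : List (List Int) := [[1, 2], [1, 3, 2], [1, 4, 2], [5]]

def Spec_group_connected_paths (connected_paths : List (List Int)) (out : List (List (List Int))) : Prop := out = group_connected_paths_alt connected_paths
instance (connected_paths : List (List Int)) (out : List (List (List Int))) : Decidable (Spec_group_connected_paths connected_paths out) := by unfold Spec_group_connected_paths; infer_instance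

-- ===== CLAIM (what is proved, stated in full; the proofs are below) =====
def Claim_equal_group_connected_paths : Prop := ∀ (connected_paths : List (List Int)), Dom_group_connected_paths connected_paths → Pre_group_connected_paths connected_paths → Spec_group_connected_paths connected_paths (group_connected_paths connected_paths)

-- ===== LEMMAS AND PROOFS =====

-- the maximal runs of consecutive key-equal paths (spec-side common shape)
def pvRunsAux (k : List Int × List Int × Int) (cur : List (List Int)) :
    List (List Int) → List (List (List Int))
  | [] => [cur]
  | p :: ps =>
    if pvKey p = k then pvRunsAux k (cur ++ [p]) ps
    else cur :: pvRunsAux (pvKey p) [p] ps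

def pvRuns : List (List Int) → List (List (List Int))
  | [] => []
  | p :: ps => pvRunsAux (pvKey p) [p] ps

-- run-id labels produced for the remaining keys, given current id g and previous key k
def pvGids (g : Int) (k : List Int × List Int × Int) :
    List (List Int × List Int × Int) → List Int
  | [] => []
  | k' :: ks => let g' := if k' ≠ k then g + 1 else g; g' :: pvGids g' k' ks

-- A's branch condition is key equality, on nonempty paths
theorem pv_cond_iff_key (p h : List Int) (hp : p ≠ []) (hh : h ≠ []) :
    (PySem.List.pyGet? p 0 = PySem.List.pyGet? h 0 ∧
     PySem.List.pyGet? p (-1) = PySem.List.pyGet? h (-1) ∧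
     p.length = h.length) ↔ pvKey p = pvKey h := by
  rw [pvKey, pvKey, PySem.List.slice_to p (by omega), PySem.List.slice_to h (by omega),
    PySem.List.slice_from_neg_one, PySem.List.slice_from_neg_one,
    List.drop_length_sub_one hp, List.drop_length_sub_one hh,
    PySem.List.pyGet?_neg_one, PySem.List.pyGet?_neg_one,
    List.getLast?_eq_some_getLast hp, List.getLast?_eq_some_getLast hh]
  obtain ⟨a, p, rfl⟩ := List.exists_cons_of_ne_nil hp
  obtain ⟨b, h, rfl⟩ := List.exists_cons_of_ne_nil hh
  simp [Prod.ext_iff]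

-- A's fold with its final flush computes the size filter of the runs
theorem pvA_core (ps : List (List Int)) :
    ∀ (grouped : List (List (List Int))) (cur : List (List Int)), cur ≠ [] →
    (ps ≠ [] → cur.headD [] ≠ []) → (∀ p ∈ ps, p ≠ []) →
    (let st := ps.foldl pvStepA (grouped, cur);
     if 1 < st.2.length then st.1 ++ [st.2] else st.1)
    = grouped ++ (pvRunsAux (pvKey (cur.headD [])) cur ps).filter
        (fun r => decide (1 < r.length)) := by
  induction ps with
  | nil =>
    intro grouped cur hcur _ _
    simp only [List.foldl_nil, pvRunsAux, List.filter]
    split_ifs with h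
    · simp [h]
    · simp [h]
  | cons p ps ih =>
    intro grouped cur hcur hhead hps
    have hh : cur.headD [] ≠ [] := hhead (by simp)
    have hp : p ≠ [] := hps p (by simp)
    have hget : PySem.List.pyGetD cur 0 [] = cur.headD [] := by
      obtain ⟨c, cur, rfl⟩ := List.exists_cons_of_ne_nil hcur
      simp [PySem.List.pyGetD]
    simp only [List.foldl_cons, pvStepA, hget, pvRunsAux]
    by_cases hk : pvKey p = pvKey (cur.headD [])
    · rw [if_pos ((pv_cond_iff_key p _ hp hh).mpr hk), if_pos hk]
      have hhd : (cur ++ [p]).headD [] = cur.headD [] := by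
        obtain ⟨c, cur, rfl⟩ := List.exists_cons_of_ne_nil hcur; simp
      have := ih grouped (cur ++ [p]) (by simp) (by rw [hhd]; exact fun _ => hh)
        (fun q hq => hps q (by simp [hq]))
      rw [hhd] at this
      exact this
    · rw [if_neg (fun hc => hk ((pv_cond_iff_key p _ hp hh).mp hc)), if_neg hk]
      have := ih (if 1 < cur.length then grouped ++ [cur] else grouped) [p]
        (by simp) (by simp [hp]) (fun q hq => hps q (by simp [hq]))
      simp only [List.headD_cons] at this
      rw [this, List.filter_cons]
      by_cases h : 1 < cur.length
      · simp [h, List.append_assoc]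
      · simp [h]

theorem pvGids_length (ks : List (List Int × List Int × Int)) :
    ∀ g k, (pvGids g k ks).length = ks.length := by
  induction ks with
  | nil => intro g k; rfl
  | cons k' ks ih => intro g k; simp [pvGids, ih]

theorem pvGids_lb (ks : List (List Int × List Int × Int)) :
    ∀ g k x, x ∈ pvGids g k ks → g ≤ x := by
  induction ks with
  | nil => intro g k x hx; simp [pvGids] at hx
  | cons k' ks ih =>
    intro g k x hx
    simp only [pvGids, List.mem_cons] at hx
    rcases hx with rfl | hx
    · split_ifs <;> omega
    · have := ih _ k' x hx
      split_ifs at this <;> omega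

-- the labeling fold appends pvGids to the accumulator
theorem pvGid_fold (ks : List (List Int × List Int × Int)) :
    ∀ g k acc, (ks.foldl pvGidStep (g, some k, acc)).2.2 = acc ++ pvGids g k ks := by
  induction ks with
  | nil => intro g k acc; simp [pvGids]
  | cons k' ks ih =>
    intro g k acc
    simp only [List.foldl_cons, pvGidStep, pvGids]
    split_ifs with h
    · rw [ih]; simp
    · rw [ih]; simp

-- removing an absent element is a no-op
theorem pv_discard_not_mem (a : Int) (s : List Int) (ha : a ∉ s) :
    PySem.Set.discard s a = s := by
  simp only [PySem.Set.discard]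
  rw [List.filter_eq_self]
  intro x hx
  have hxa : x ≠ a := fun h => ha (h ▸ hx)
  simp [hxa]

-- dedup drops a repeated head block and keeps later fresh labels
theorem pv_dedup_replicate_append (a : Int) (l : List Int) (n : Nat) (hn : 0 < n)
    (ha : a ∉ l) : PySem.List.dedup (List.replicate n a ++ l) = a :: PySem.List.dedup l := by
  simp only [PySem.List.dedup_eq_ofList]
  have hnm : a ∉ PySem.Set.ofList l := by
    rw [← PySem.List.dedup_eq_ofList]
    exact fun h => ha ((PySem.List.mem_dedup _ _).mp h)
  induction n with
  | zero => omega
  | succ n ih =>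
    rcases Nat.eq_zero_or_pos n with rfl | hn'
    · rw [List.replicate_succ, List.replicate_zero, List.cons_append, List.nil_append,
        PySem.Set.ofList_cons, pv_discard_not_mem a _ hnm]
    · rw [List.replicate_succ, List.cons_append, PySem.Set.ofList_cons, ih hn']
      have hstep : PySem.Set.discard (a :: PySem.Set.ofList l) a
          = PySem.Set.discard (PySem.Set.ofList l) a := by
        simp [PySem.Set.discard]
      rw [hstep, pv_discard_not_mem a _ hnm]

-- zipping a constant label block with its paths
theorem pv_zip_replicate (g : Int) (cur : List (List Int)) :
    (List.replicate cur.length g).zip cur = cur.map (fun c => (g, c)) := by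
  induction cur with
  | nil => rfl
  | cons c cur ih => simp [List.replicate_succ, ih]

-- bucket extraction from a labeled block plus a remainder with fresh labels
theorem pv_filter_block (g c : Int) (cur : List (List Int)) :
    (((List.replicate cur.length g).zip cur).filter (fun q => q.1 == c)).map (·.2)
      = if g = c then cur else [] := by
  rw [pv_zip_replicate, List.filter_map, List.map_map]
  split_ifs with h
  · simp [Function.comp_def, h]
  · simp [Function.comp_def, h]

-- B's buckets, read back in key order, are exactly the runs
theorem pvB_core (ps : List (List Int)) :
    ∀ (g : Int) (k : List Int × List Int × Int) (cur : List (List Int)), cur ≠ [] →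
    ((PySem.List.dedup (List.replicate cur.length g ++ pvGids g k (ps.map pvKey))).map
      (fun c => (((List.replicate cur.length g ++ pvGids g k (ps.map pvKey)).zip
        (cur ++ ps)).filter (fun q => q.1 == c)).map (·.2)))
    = pvRunsAux k cur ps := by
  induction ps with
  | nil =>
    intro g k cur hcur
    simp only [List.map_nil, pvGids, List.append_nil, pvRunsAux]
    have hd := pv_dedup_replicate_append g [] cur.length
      (by cases cur with | nil => exact absurd rfl hcur | cons c cs => simp) (by simp)
    have hnil : PySem.List.dedup ([] : List Int) = [] := rfl
    simp only [List.append_nil, hnil] at hd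
    rw [hd]
    simp [pv_filter_block]
  | cons p ps ih =>
    intro g k cur hcur
    simp only [List.map_cons, pvGids, pvRunsAux]
    by_cases hk : pvKey p = k
    · subst hk
      rw [if_neg (by simp), if_pos rfl]
      have hrep : List.replicate cur.length g ++ g :: pvGids g (pvKey p) (ps.map pvKey)
          = List.replicate (cur ++ [p]).length g ++ pvGids g (pvKey p) (ps.map pvKey) := by
        simp [List.replicate_succ', List.append_assoc]
      have hlist : cur ++ p :: ps = (cur ++ [p]) ++ ps := by simp
      rw [hrep, hlist]
      exact ih g (pvKey p) (cur ++ [p]) (by simp)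
    · rw [if_pos hk, if_neg hk]
      have hfresh : ∀ x ∈ (g + 1) :: pvGids (g + 1) (pvKey p) (ps.map pvKey), g < x := by
        intro x hx
        rcases List.mem_cons.mp hx with rfl | hx
        · omega
        · have := pvGids_lb (ps.map pvKey) (g + 1) (pvKey p) x hx; omega
      have hnotmem : g ∉ (g + 1) :: pvGids (g + 1) (pvKey p) (ps.map pvKey) := by
        intro hmem; exact absurd (hfresh g hmem) (lt_irrefl g)
      rw [pv_dedup_replicate_append g _ cur.length
        (by cases cur with | nil => exact absurd rfl hcur | cons c cs => simp) hnotmem]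
      have hzip : (List.replicate cur.length g
            ++ (g + 1) :: pvGids (g + 1) (pvKey p) (ps.map pvKey)).zip (cur ++ p :: ps)
          = (List.replicate cur.length g).zip cur
            ++ ((g + 1) :: pvGids (g + 1) (pvKey p) (ps.map pvKey)).zip (p :: ps) :=
        List.zip_append (by simp)
      rw [List.map_cons, hzip]
      congr 1
      · rw [List.filter_append, List.map_append, pv_filter_block, if_pos rfl]
        have : (((g + 1) :: pvGids (g + 1) (pvKey p) (ps.map pvKey)).zip (p :: ps)).filter
            (fun q => q.1 == g) = [] := by
          rw [List.filter_eq_nil_iff]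
          intro q hq
          have h1 : q.1 ∈ (g + 1) :: pvGids (g + 1) (pvKey p) (ps.map pvKey) :=
            (List.of_mem_zip hq).1
          have := hfresh q.1 h1
          simp only [beq_iff_eq]; omega
        rw [this]; simp
      · have := ih (g + 1) (pvKey p) [p] (by simp)
        simp only [List.length_cons, List.length_nil, List.singleton_append] at this
        rw [← this]
        apply List.map_congr_left
        intro c hc
        have hcg : g < c := by
          have : c ∈ (g + 1) :: pvGids (g + 1) (pvKey p) (ps.map pvKey) := by
            exact (PySem.List.mem_dedup _ _).mp hc
          exact hfresh c this
        rw [List.filter_append, List.map_append, pv_filter_block, if_neg (by omega)]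
        simp

-- ===== VERDICT (by name: the statement is the Claim_ definition above) =====
theorem group_connected_paths_spec : Claim_equal_group_connected_paths := by
  intro cp _ hpre
  obtain ⟨hne, hall⟩ := hpre
  obtain ⟨p0, ps, rfl⟩ := List.exists_cons_of_ne_nil hne
  show group_connected_paths (p0 :: ps) = group_connected_paths_alt (p0 :: ps)
  -- A's side
  have hdrop : group_connected_paths (p0 :: ps)
      = [] ++ (pvRunsAux (pvKey p0) [p0] ps).filter (fun r => decide (1 < r.length)) := by
    have hrange : (PySem.List.pyRange 1 ((p0 :: ps).length : Int) 1).foldl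
        (fun st i => pvStepA st (PySem.List.pyGetD (p0 :: ps) i []))
        (([] : List (List (List Int))), [p0])
        = ps.foldl pvStepA ([], [p0]) := by
      have := PySem.List.foldl_pyRange_pyGetD' (xs := p0 :: ps) (a := 1)
        (f := pvStepA) (d := ([] : List Int))
        (init := (([] : List (List (List Int))), [p0])) (by omega)
      simpa using this
    have hA := pvA_core ps [] [p0] (by simp)
      (by intro hps; simp only [List.headD_cons]
          exact hall (by cases ps with
            | nil => simp at hps
            | cons q qs => simp only [List.length_cons]; omega) p0 (by simp))
      (fun p hp => by
        cases ps with
        | nil => simp at hp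
        | cons q qs => exact hall (by simp only [List.length_cons]; omega) p (by simp [hp]))
    simp only [List.headD_cons] at hA
    simp only [group_connected_paths, PySem.List.pyGet?_zero_cons]
    rw [hrange]
    exact hA
  rw [hdrop, List.nil_append]
  -- B's side
  have hgids : (((p0 :: ps).map pvKey).foldl pvGidStep (0, none, [])).2.2
      = List.replicate ([p0] : List (List Int)).length 0 ++ pvGids 0 (pvKey p0) (ps.map pvKey) := by
    simp only [List.map_cons, List.foldl_cons, pvGidStep]
    rw [pvGid_fold]
    simp
  have hB := pvB_core ps 0 (pvKey p0) [p0] (by simp)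
  simp only [group_connected_paths_alt]
  rw [hgids]
  set gids := List.replicate ([p0] : List (List Int)).length 0
      ++ pvGids 0 (pvKey p0) (ps.map pvKey) with hgdef
  have hlen : gids.length = (p0 :: ps).length := by
    simp [hgdef, pvGids_length]
  -- buckets via the PySem dict lemmas
  set buckets := ((gids.zip (p0 :: ps)).foldl
    (fun d q => d.modify q.1 [] (· ++ [q.2])) PySem.Dict.empty) with hbdef
  have hkeys : buckets.keys = PySem.List.dedup gids := by
    rw [hbdef]
    rw [PySem.Dict.keys_foldl_modify_key (key := Prod.fst)]
    rw [List.map_fst_zip (le_of_eq hlen)]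
    simp [PySem.List.dedup_eq_ofList, PySem.Set.update, PySem.Set.ofList,
      PySem.Set.empty, PySem.Dict.keys_empty]
  have hnodup : buckets.keys.Nodup := by
    rw [hkeys]; exact PySem.List.nodup_dedup gids
  have hgetD : ∀ c, buckets.getD c [] = ((gids.zip (p0 :: ps)).filter
      (fun q => q.1 == c)).map (·.2) := by
    intro c
    rw [hbdef, PySem.Dict.getD_foldl_modify_append]
    simp
  rw [PySem.Dict.values_eq_map_keys buckets hnodup [], hkeys]
  have : (PySem.List.dedup gids).map (fun c => buckets.getD c [])
      = (PySem.List.dedup gids).map (fun c => ((gids.zip (p0 :: ps)).filter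
          (fun q => q.1 == c)).map (·.2)) := by
    apply List.map_congr_left; intro c _; exact hgetD c
  rw [this, hgdef]
  have hcons : ([p0] : List (List Int)) ++ ps = p0 :: ps := by simp
  rw [show (p0 :: ps) = ([p0] : List (List Int)) ++ ps from rfl] 
  rw [hB]
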